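-- pv_equiv track=rewrite | github.com/Nightmare044/python-online-marathon | sprint01/task01.py | kthTerm
-- ===== SOURCE A (Python) =====
-- def kthTerm(n, k):
--     my_list = []
--     for i in range(7):
--         power = n ** i
--         if i == 0:
--             my_list.append(power)
--         else:
--             sum_of_powers = [power + j for j in my_list]
--             my_list.append(power)
--             my_list += sum_of_powers
--
--     return my_list[k - 1]
-- ===== SOURCE B (Python) =====
-- def kthTerm(n, k):
--     # The 127 table entries run through the nonzero 7-bit patterns cyclically:
--     # the entry for k is the sum of n**i over the set bits of ((k-1) % 127) + 1.
--     m = (k - 1) % 127 + 1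
--     return sum(n ** i for i in range(7) if (m >> i) & 1)
-- ===== Notes on version B (the rewrite author's own statement) =====
-- stated objective: faster
-- what changed: B drops A's doubling construction of the 127-element power-sum table and instead reads the answer off the binary representation of the cyclic position ((k-1) % 127) + 1, summing n**i over its set bits; Pre_ excludes |k| out of range, where A's list index k-1 raises IndexError.
import Mathlib
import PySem

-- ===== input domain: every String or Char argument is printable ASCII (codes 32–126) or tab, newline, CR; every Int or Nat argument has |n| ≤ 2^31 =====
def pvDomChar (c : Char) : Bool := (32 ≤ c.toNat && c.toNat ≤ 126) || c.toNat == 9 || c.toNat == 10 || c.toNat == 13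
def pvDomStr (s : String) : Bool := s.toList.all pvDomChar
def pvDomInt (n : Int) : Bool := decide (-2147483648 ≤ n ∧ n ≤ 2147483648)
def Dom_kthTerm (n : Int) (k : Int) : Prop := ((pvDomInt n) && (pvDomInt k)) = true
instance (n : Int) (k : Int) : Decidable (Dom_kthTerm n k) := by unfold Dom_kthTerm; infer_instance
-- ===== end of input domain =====

-- B replaces A's doubling construction of the 127-element power-sum table by summing
-- n^i over the set bits of the cyclic position ((k-1) % 127) + 1; equal on Pre_.

-- ===== PORT A =====
-- the list A builds in its 7-iteration loop
def kthTermList (n : Int) : List Int :=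
  (List.range 7).foldl (fun myList i =>
    let power := n ^ i
    if i = 0 then
      myList ++ [power]
    else
      let sumOfPowers := myList.map (fun j => power + j)
      (myList ++ [power]) ++ sumOfPowers) []

def kthTerm (n : Int) (k : Int) : Int :=
  PySem.List.pyGetD (kthTermList n) (k - 1) 0  -- my_list[k-1]; IndexError excluded by Pre_

-- ===== PORT B =====
-- sum(n ** i for i in range(7) if (m >> i) & 1)
def bitPowSum (n : Int) (m : Int) : Int :=
  (List.range 7).foldl (fun (acc : Int) (i : Nat) =>
    if PySem.Int.band (m >>> i) 1 = 1 then acc + n ^ i else acc) 0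

def kthTerm_alt (n : Int) (k : Int) : Int :=
  let m := PySem.Int.mod (k - 1) 127 + 1
  bitPowSum n m

-- ===== PRECONDITION & SPEC =====
-- exactly the k for which my_list[k-1] (a 127-element list) does not raise IndexError
def Pre_kthTerm (n : Int) (k : Int) : Prop := -126 ≤ k ∧ k ≤ 127
instance (n : Int) (k : Int) : Decidable (Pre_kthTerm n k) := by unfold Pre_kthTerm; infer_instance
def pvWitness_kthTerm : Int × Int := (3, 5)

def Spec_kthTerm (n : Int) (k : Int) (out : Int) : Prop := out = kthTerm_alt n k
instance (n : Int) (k : Int) (out : Int) : Decidable (Spec_kthTerm n k out) := by unfold Spec_kthTerm; infer_instance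

-- ===== CLAIM (what is proved, stated in full; the proofs are below) =====
def Claim_equal_kthTerm : Prop := ∀ (n : Int) (k : Int), Dom_kthTerm n k → Pre_kthTerm n k → Spec_kthTerm n k (kthTerm n k)

-- ===== LEMMAS AND PROOFS =====

-- Nat-indexed form of B's per-bit summand
def bitF (n : Int) (m : Nat) : Int :=
  ((List.range 7).map (fun i => if m.testBit i then n ^ i else 0)).sum

theorem band_shift_eq_testBit (m i : Nat) :
    (PySem.Int.band ((m : Int) >>> i) 1 = 1) ↔ m.testBit i = true := by
  rw [← Int.natCast_shiftRight, PySem.Int.band_one,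
    show ((2:Int)) = ((2:Nat):Int) from rfl, PySem.Int.mod_natCast]
  norm_cast
  simp [Nat.testBit, Nat.one_and_eq_mod_two]

theorem bitPowSum_natCast (n : Int) (m : Nat) : bitPowSum n (m : Int) = bitF n m := by
  unfold bitPowSum bitF
  have hfun : (fun (acc : Int) (i : Nat) =>
      if PySem.Int.band ((m : Int) >>> i) 1 = 1 then acc + n ^ i else acc)
      = fun (acc : Int) (i : Nat) => acc + (if m.testBit i then n ^ i else 0) := by
    funext acc i
    by_cases h : m.testBit i
    · rw [if_pos ((band_shift_eq_testBit m i).mpr h), if_pos h]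
    · rw [if_neg (fun hc => h ((band_shift_eq_testBit m i).mp hc)), if_neg h, add_zero]
  rw [hfun, PySem.List.foldl_add, zero_add]

theorem sum_ite_single (n : Int) (t k : Nat) (ht : t < k) :
    ((List.range k).map (fun i => if i = t then n ^ t else (0:Int))).sum = n ^ t := by
  induction k with
  | zero => omega
  | succ k ih =>
    rw [List.range_succ, List.map_append, List.sum_append]
    simp only [List.map_cons, List.map_nil, List.sum_cons, List.sum_nil, add_zero]
    by_cases h : t = k
    · subst h
      have hz : ∀ i ∈ List.range t, (if i = t then n ^ t else (0:Int)) = 0 := by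
        intro i hi; rw [List.mem_range] at hi; simp [Nat.ne_of_lt hi]
      rw [List.map_congr_left hz, if_pos rfl]
      simp
    · rw [if_neg (fun hh : k = t => h hh.symm), ih (by omega), add_zero]

theorem bitF_two_pow (n : Int) (t : Nat) (ht : t < 7) : bitF n (2 ^ t) = n ^ t := by
  unfold bitF
  have hpt : ∀ i ∈ List.range 7, (if (2 ^ t).testBit i then n ^ i else (0:Int))
      = (if i = t then n ^ t else 0) := by
    intro i _
    rw [Nat.testBit_two_pow]
    by_cases h : i = t
    · subst h; simp
    · rw [if_neg (by simpa using fun hh : t = i => h hh.symm), if_neg h]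
  rw [List.map_congr_left hpt, sum_ite_single n t 7 ht]

theorem bitF_split (n : Int) (t m : Nat) (ht : t < 7) (hm : 0 < m) (hlt : m < 2 ^ t) :
    bitF n (2 ^ t + m) = n ^ t + bitF n m := by
  unfold bitF
  have hpt : ∀ i ∈ List.range 7, (if (2 ^ t + m).testBit i then n ^ i else (0:Int))
      = (if i = t then n ^ t else 0) + (if m.testBit i then n ^ i else 0) := by
    intro i _
    rcases lt_trichotomy i t with h | h | h
    · rw [Nat.testBit_two_pow_add_gt h m, if_neg (Nat.ne_of_lt h), zero_add]
    · subst h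
      rw [Nat.testBit_two_pow_add_eq, Nat.testBit_lt_two_pow hlt]
      simp
    · have h2i : 2 ^ t + m < 2 ^ i := by
        calc 2 ^ t + m < 2 ^ t + 2 ^ t := by omega
        _ = 2 ^ (t + 1) := by ring
        _ ≤ 2 ^ i := Nat.pow_le_pow_right (by omega) (by omega)
      rw [Nat.testBit_lt_two_pow h2i, Nat.testBit_lt_two_pow (by omega : m < 2 ^ i)]
      simp [Nat.ne_of_gt h]
  rw [List.map_congr_left hpt, PySem.List.sum_map_add_int,
    sum_ite_single n t 7 ht]

-- A's loop body, named so the invariant can speak about one step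
def stepA (n : Int) (myList : List Int) (i : Nat) : List Int :=
  let power := n ^ i
  if i = 0 then
    myList ++ [power]
  else
    let sumOfPowers := myList.map (fun j => power + j)
    (myList ++ [power]) ++ sumOfPowers

theorem build_invariant (n : Int) :
    ∀ t, t ≤ 7 → (List.range t).foldl (stepA n) []
      = (List.range (2 ^ t - 1)).map (fun p => bitF n (p + 1)) := by
  intro t
  induction t with
  | zero => intro _; simp
  | succ t ih =>
    intro ht
    rw [List.range_succ, List.foldl_append, List.foldl_cons, List.foldl_nil,
      ih (by omega)]
    by_cases h0 : t = 0
    · subst h0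
      have h1 : bitF n 1 = n ^ 0 := by
        have := bitF_two_pow n 0 (by omega); simpa using this
      simp [stepA, h1, List.range_succ]
    · have hpos : 0 < 2 ^ t := Nat.two_pow_pos t
      obtain ⟨s, hs⟩ : ∃ s, 2 ^ t = 1 + s := ⟨2 ^ t - 1, by omega⟩
      have hs' : 2 ^ t - 1 = s := by omega
      have hstep : stepA n ((List.range s).map fun p => bitF n (p + 1)) t
          = (((List.range s).map fun p => bitF n (p + 1)) ++ [n ^ t])
            ++ ((List.range s).map fun p => bitF n (p + 1)).map
                (fun j => n ^ t + j) := by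
        simp [stepA, h0]
      have hsplit : 2 ^ (t + 1) - 1 = s + (1 + s) := by
        have h2 : 2 ^ (t + 1) = 2 ^ t + 2 ^ t := by ring
        omega
      rw [hs', hstep, hsplit, List.range_add, List.map_append, List.map_map,
        List.append_assoc, List.range_add, List.range_one]
      simp only [List.map_append, List.map_map]
      congr 1
      simp only [List.map_cons, List.map_nil, Function.comp_apply,
        List.cons_append, List.nil_append]
      congr 1
      · rw [show s + 0 + 1 = 2 ^ t by omega, bitF_two_pow n t (by omega)]
      · apply List.map_congr_left
        intro p hp
        rw [List.mem_range] at hp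
        simp only [Function.comp_apply]
        rw [show s + (1 + p) + 1 = 2 ^ t + (p + 1) by omega,
          bitF_split n t (p + 1) (by omega) (by omega) (by omega)]

theorem kthTermList_eq (n : Int) :
    kthTermList n = (List.range 127).map (fun p => bitF n (p + 1)) := by
  have h := build_invariant n 7 (by omega)
  have h7 : (2 : Nat) ^ 7 - 1 = 127 := by norm_num
  rw [h7] at h
  exact h

-- ===== VERDICT (by name: the statement is the Claim_ definition above) =====
theorem kthTerm_spec : Claim_equal_kthTerm := by
  intro n k _ hpre
  unfold Spec_kthTerm kthTerm
  obtain ⟨hlo, hhi⟩ := hpre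
  rw [kthTermList_eq n]
  have hmod : PySem.Int.mod (k - 1) 127 = (k - 1) % 127 :=
    PySem.Int.mod_eq_emod_of_pos (by omega)
  by_cases hneg : k - 1 < 0
  · -- negative index wraps: my_list[k-1] = my_list[k-1+127]
    have halt : kthTerm_alt n k = bitPowSum n (k - 1 + 127 + 1) := by
      simp only [kthTerm_alt, hmod]
      rw [show (k - 1) % 127 = k - 1 + 127 by omega]
    set c : Nat := (1 - k).toNat with hc
    have hidx : k - 1 = -((c : Nat) : Int) := by omega
    rw [halt, hidx,
      PySem.List.pyGetD_neg_natCast _ c 0 (by omega)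
        (by simp only [List.length_map, List.length_range]; omega)]
    simp only [List.length_map, List.length_range, List.getElem_map,
      List.getElem_range]
    rw [show -((c : Nat) : Int) + 127 + 1 = ((127 - c + 1 : Nat) : Int) by omega,
      bitPowSum_natCast]
  · -- nonnegative index
    have halt : kthTerm_alt n k = bitPowSum n (k - 1 + 1) := by
      simp only [kthTerm_alt, hmod]
      rw [show (k - 1) % 127 = k - 1 by omega]
    rw [halt, PySem.List.pyGetD_eq_getElem _ 0 (by omega)
      (by simp only [List.length_map, List.length_range]; push_cast; omega)]
    simp only [List.getElem_map, List.getElem_range]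
    rw [show k - 1 + 1 = (((k - 1).toNat + 1 : Nat) : Int) by omega,
      bitPowSum_natCast]
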